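-- pv_equiv track=rewrite | github.com/TodaysTomSawyer587/AoC2021 | 18/18.py | process
-- ===== SOURCE A (Python) =====
-- def isint(char):
--     """Determines if str char can be retyped to an int"""
--
--     try:
--         int(char)
--     except ValueError:
--         return False
--
--     return True
--
-- def process(raw_number):
--     """Converts line of input text to snail number"""
--
--     level = 0
--     digits = []
--
--     for char in raw_number:
--         if char == '[':
--             level += 1
--         elif char == ']':
--             level -= 1
--         elif isint(char):
--             digits.append([int(char), level])
--
--     return digits
-- ===== SOURCE B (Python) =====
-- def process(raw_number):
--     """Converts line of input text to snail number"""
--     # Split on '[' (each later chunk starts one level deeper), then split each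
--     # chunk on ']' (each later piece one level shallower); pieces are bracket-free,
--     # so their digits all sit at the piece's depth.
--     digits = []
--     depth = 0
--     for j, chunk in enumerate(raw_number.split('[')):
--         if j:
--             depth += 1
--         for k, piece in enumerate(chunk.split(']')):
--             if k:
--                 depth -= 1
--             digits.extend([int(c), depth] for c in piece if '0' <= c <= '9')
--     return digits
-- ===== Notes on version B (the rewrite author's own statement) =====
-- stated objective: faster
-- what changed: A scans character by character with a running level counter, branching on every char and probing digits with try/except int(); B instead splits the string on the opening bracket and each chunk on the closing bracket, so depth changes once per bracket-free piece and digits are harvested from whole pieces with a comprehension (the C-level str.split does the bracket scanning).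
import Mathlib
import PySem

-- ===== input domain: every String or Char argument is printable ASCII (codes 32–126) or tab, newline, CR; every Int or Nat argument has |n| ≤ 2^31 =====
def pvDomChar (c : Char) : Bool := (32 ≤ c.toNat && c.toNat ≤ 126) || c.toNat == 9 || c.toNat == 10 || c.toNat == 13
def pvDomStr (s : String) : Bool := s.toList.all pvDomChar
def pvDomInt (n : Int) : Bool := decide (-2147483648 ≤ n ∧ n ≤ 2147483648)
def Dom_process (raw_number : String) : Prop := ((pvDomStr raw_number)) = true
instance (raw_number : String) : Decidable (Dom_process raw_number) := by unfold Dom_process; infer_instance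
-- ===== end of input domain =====

-- B replaces A's char-by-char counter loop by splitting the string on the opening
-- bracket and each chunk on the closing bracket, harvesting digits from the
-- bracket-free pieces; a timing run measured B faster by a constant factor.

-- ===== PORT A =====
-- isint(char): int(char) succeeds; for a single ASCII char (the stated domain)
-- this is exactly '0' ≤ char ≤ '9' (exact on printable ASCII + tab/newline/CR).
def isint (char : Char) : Bool := '0' ≤ char && char ≤ '9'

-- A's loop: running level, digits accumulator, appended at the back.
def processLoop : List Char → Int → List (List Int) → List (List Int)
  | [], _, digits => digits
  | c :: cs, level, digits =>
    if c = '[' then processLoop cs (level + 1) digits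
    else if c = ']' then processLoop cs (level - 1) digits
    else if isint c then processLoop cs level (digits ++ [[(c.toNat : Int) - 48, level]])
    else processLoop cs level digits

def process (raw_number : String) : List (List Int) :=
  processLoop raw_number.toList 0 []

-- ===== PORT B =====
-- Python's str.split(sep) for a single-char separator, on List Char (exact:
-- ''.split(sep) = [''], leading/adjacent/trailing separators give empty pieces).
def pySplit (sep : Char) : List Char → List (List Char)
  | [] => [[]]
  | c :: cs =>
    if c = sep then [] :: pySplit sep cs
    else
      match pySplit sep cs with
      | q :: qs => (c :: q) :: qs
      | [] => [[c]]  -- unreachable: pySplit never returns []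

-- the inner comprehension: digits of a bracket-free piece, all at depth d
def extractDigits (piece : List Char) (d : Int) : List (List Int) :=
  (piece.filter (fun c => '0' ≤ c && c ≤ '9')).map (fun c => [(c.toNat : Int) - 48, d])

-- inner loop, pieces after the first (each preceded by a ']': depth -= 1)
def innerRest : List (List Char) → Int → List (List Int) → Int × List (List Int)
  | [], d, out => (d, out)
  | q :: qs, d, out => innerRest qs (d - 1) (out ++ extractDigits q (d - 1))

-- one chunk of the outer split: split on ']', first piece at the current depth
def innerChunk (chunk : List Char) (d : Int) (out : List (List Int)) :
    Int × List (List Int) :=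
  match pySplit ']' chunk with
  | [] => (d, out)  -- unreachable
  | q :: qs => innerRest qs d (out ++ extractDigits q d)

-- outer loop, chunks after the first (each preceded by a '[': depth += 1)
def outerRest : List (List Char) → Int × List (List Int) → List (List Int)
  | [], (_, out) => out
  | p :: ps, (d, out) => outerRest ps (innerChunk p (d + 1) out)

def process_alt (raw_number : String) : List (List Int) :=
  match pySplit '[' raw_number.toList with
  | [] => []  -- unreachable
  | p :: ps => outerRest ps (innerChunk p 0 [])

-- ===== PRECONDITION & SPEC =====
def Spec_process (raw_number : String) (out : List (List Int)) : Prop := out = process_alt raw_number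
instance (raw_number : String) (out : List (List Int)) : Decidable (Spec_process raw_number out) := by unfold Spec_process; infer_instance

-- ===== CLAIM (what is proved, stated in full; the proofs are below) =====
def Claim_equal_process : Prop := ∀ (raw_number : String), Dom_process raw_number → Spec_process raw_number (process raw_number)

-- ===== LEMMAS AND PROOFS =====

theorem pySplit_ne_nil (sep : Char) (cs : List Char) : pySplit sep cs ≠ [] := by
  cases cs with
  | nil => simp [pySplit]
  | cons c cs =>
    simp only [pySplit]
    split
    · simp
    · cases h : pySplit sep cs <;> simp

-- feeding the whole ']'-split of p to innerRest = innerChunk at depth d - 1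
theorem innerRest_split (p : List Char) (d : Int) (out : List (List Int)) :
    innerRest (pySplit ']' p) d out = innerChunk p (d - 1) out := by
  unfold innerChunk
  cases h : pySplit ']' p with
  | nil => exact absurd h (pySplit_ne_nil _ _)
  | cons q qs => simp [innerRest]

theorem innerChunk_nil (d : Int) (out : List (List Int)) :
    innerChunk [] d out = (d, out) := by
  simp [innerChunk, pySplit, innerRest, extractDigits]

theorem innerChunk_close (p : List Char) (d : Int) (out : List (List Int)) :
    innerChunk (']' :: p) d out = innerChunk p (d - 1) out := by
  conv_lhs => rw [innerChunk]
  simp only [pySplit]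
  simp [extractDigits, innerRest_split]

theorem innerChunk_other (c : Char) (p : List Char) (d : Int) (out : List (List Int))
    (hc : c ≠ ']') :
    innerChunk (c :: p) d out =
      innerChunk p d (out ++ extractDigits [c] d) := by
  unfold innerChunk
  simp only [pySplit, if_neg hc]
  cases h : pySplit ']' p with
  | nil => exact absurd h (pySplit_ne_nil _ _)
  | cons q qs =>
    simp [extractDigits, List.filter]
    by_cases hd : ('0' ≤ c && c ≤ '9') = true <;> simp [hd]

-- main invariant: B's split machinery run on cs equals A's loop on cs
theorem main_eq (cs : List Char) : ∀ (d : Int) (out : List (List Int)),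
    (match pySplit '[' cs with
     | [] => out
     | p :: ps => outerRest ps (innerChunk p d out)) = processLoop cs d out := by
  induction cs with
  | nil => intro d out; simp [pySplit, innerChunk_nil, outerRest, processLoop]
  | cons c cs ih =>
    intro d out
    cases h : pySplit '[' cs with
    | nil => exact absurd h (pySplit_ne_nil _ _)
    | cons p ps =>
      by_cases hb : c = '['
      · subst hb
        rw [processLoop]
        rw [← ih (d + 1) out, h]
        simp [pySplit, h, innerChunk_nil, outerRest]
      · by_cases hc : c = ']'
        · subst hc
          rw [processLoop]
          simp only [if_neg hb]
          rw [← ih (d - 1) out, h]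
          simp [pySplit, hb, h, innerChunk_close]
        · rw [processLoop]
          simp only [if_neg hb, if_neg hc]
          by_cases hd : isint c = true
          · have hd' : ('0' ≤ c && c ≤ '9') = true := hd
            simp only [hd]
            rw [← ih d _, h]
            simp [pySplit, hb, h, innerChunk_other c p d out hc, extractDigits, hd']
          · have hd' : ('0' ≤ c && c ≤ '9') = false := by simpa [isint] using hd
            simp only [hd]
            rw [← ih d out, h]
            simp [pySplit, hb, h, innerChunk_other c p d out hc, extractDigits, hd']

-- ===== VERDICT (by name: the statement is the Claim_ definition above) =====
theorem process_spec : Claim_equal_process := by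
  intro raw_number _
  unfold Spec_process process process_alt
  rw [← main_eq raw_number.toList 0 []]
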